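-- pv_equiv track=rewrite | github.com/bensoer/pychat | crypto/algorithms/pureaescipher.py | _shiftRow
-- ===== SOURCE A (Python) =====
-- def _shiftRow(state, statePointer, nbr, isInv):
--     '''
--     each iteration shifts the row to the left by 1
--     '''
--     for i in range(nbr):
--         if isInv:
--             state[statePointer:statePointer+4] = \
--                     state[statePointer+3:statePointer+4] + \
--                     state[statePointer:statePointer+3]
--         else:
--             state[statePointer:statePointer+4] = \
--                     state[statePointer+1:statePointer+4] + \
--                     state[statePointer:statePointer+1]
--     return state
-- ===== SOURCE B (Python) =====
-- def _shiftRow(state, statePointer, nbr, isInv):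
--     '''
--     Rotate the 4-byte row once by the net offset instead of nbr one-step shifts.
--     '''
--     sp = statePointer
--     row = state[sp:sp+4]
--     size = len(row)
--     if nbr > 0 and size > 0:
--         off = nbr % size
--         if isInv:
--             off = (size - off) % size
--         state[sp:sp+4] = row[off:] + row[:off]
--     return state
-- ===== Notes on version B (the rewrite author's own statement) =====
-- stated objective: faster
-- what changed: Replaces nbr repeated one-step slice rotations of the row with a single slice reassignment by the net offset nbr mod row-length (negated mod for the inverse direction).
-- intended difference: On an inverse shift of a row truncated by the end of the list (0 <= statePointer < len(state) < statePointer+4), when right-rotating that truncated row by nbr actually changes it, A returns the state unchanged (its slice state[sp+3:sp+4] is empty so every loop step is a no-op) while B rotates the truncated row right by nbr mod its length, the intended meaning of an inverse row shift; the corner is unreachable in the AES cipher, whose state always holds a full 4-byte row. — e.g. on _shiftRow([1, 2], 0, 1, true): A returns [1, 2], B returns [2, 1]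
-- outside the precondition, e.g. on _shiftRow([1, 2, 3], -1, 1, False): A returns [1, 2, 1, 2, 3], B returns [1, 2, 3]
import Mathlib
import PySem

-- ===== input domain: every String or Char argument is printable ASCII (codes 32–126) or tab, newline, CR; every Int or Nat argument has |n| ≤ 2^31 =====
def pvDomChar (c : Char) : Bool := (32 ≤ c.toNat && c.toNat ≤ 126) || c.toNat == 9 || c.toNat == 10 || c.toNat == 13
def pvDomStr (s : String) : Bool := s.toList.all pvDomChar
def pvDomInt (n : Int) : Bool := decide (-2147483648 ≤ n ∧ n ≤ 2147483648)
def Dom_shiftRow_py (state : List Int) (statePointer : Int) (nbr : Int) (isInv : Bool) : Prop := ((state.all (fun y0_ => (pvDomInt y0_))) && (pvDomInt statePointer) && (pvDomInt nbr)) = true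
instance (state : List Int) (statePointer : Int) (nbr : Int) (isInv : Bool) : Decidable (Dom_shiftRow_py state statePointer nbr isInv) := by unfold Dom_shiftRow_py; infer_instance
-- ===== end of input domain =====

-- B replaces nbr repeated one-step slice rotations of the row state[sp:sp+4] by a single slice
-- reassignment with the net offset nbr mod row-length (objective: faster). Both A and B mutate
-- `state` in place in Python the same way; the theorems here are about the returned value.

-- ===== PORT A =====
-- Python slice assignment xs[a:b] = ys, ported by hand (exact: clamped start/stop, stop ≥ start).
def pvSetSlice (xs : List Int) (a b : Int) (ys : List Int) : List Int :=
  xs.take (PySem.List.clampIdx xs.length a) ++ ys ++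
    xs.drop (max (PySem.List.clampIdx xs.length b) (PySem.List.clampIdx xs.length a))

def shiftRow_py (state : List Int) (statePointer : Int) (nbr : Int) (isInv : Bool) : List Int :=
  (PySem.List.pyRange 0 nbr 1).foldl
    (fun st _ =>
      if isInv then
        pvSetSlice st statePointer (statePointer + 4)
          (PySem.List.slice st (some (statePointer + 3)) (some (statePointer + 4)) ++
           PySem.List.slice st (some statePointer) (some (statePointer + 3)))
      else
        pvSetSlice st statePointer (statePointer + 4)
          (PySem.List.slice st (some (statePointer + 1)) (some (statePointer + 4)) ++
           PySem.List.slice st (some statePointer) (some (statePointer + 1))))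
    state

-- ===== PORT B =====
def shiftRow_py_alt (state : List Int) (statePointer : Int) (nbr : Int) (isInv : Bool) : List Int :=
  let row := PySem.List.slice state (some statePointer) (some (statePointer + 4))
  let size : Int := row.length
  if nbr > 0 ∧ 0 < size then
    let off0 := PySem.Int.mod nbr size
    let off := if isInv then PySem.Int.mod (size - off0) size else off0
    pvSetSlice state statePointer (statePointer + 4)
      (PySem.List.slice row (some off) none ++ PySem.List.slice row none (some off))
  else state

-- ===== PRECONDITION & SPEC =====
-- Pre_ restricts to a nonnegative row pointer, the function's natural domain (in the AES cipher
-- statePointer ∈ {0,4,8,12}): for a negative pointer A still returns, but each loop step of A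
-- GROWS the list — an accident of Python slice assignment across the sign boundary that B's
-- single reassignment does not reproduce.
def Pre_shiftRow_py (state : List Int) (statePointer : Int) (nbr : Int) (isInv : Bool) : Prop :=
  0 ≤ statePointer
instance (state : List Int) (statePointer : Int) (nbr : Int) (isInv : Bool) : Decidable (Pre_shiftRow_py state statePointer nbr isInv) := by unfold Pre_shiftRow_py; infer_instance

def pvWitness_shiftRow_py : List Int × Int × Int × Bool := ([1, 2, 3, 4, 5], 1, 2, false)

-- On an inverse shift of a row truncated by the end of the list (statePointer in range but fewer
-- than 4 elements left), when rotating that truncated row right by nbr actually changes it, A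
-- returns the state UNCHANGED (its slice state[sp+3:sp+4] is empty, so every loop step is a
-- no-op), while B rotates the truncated row right by nbr mod its length — the intended meaning of
-- an inverse row shift; the corner is unreachable in the AES cipher (full 4-byte rows only).
def D_shiftRow_py (state : List Int) (statePointer : Int) (nbr : Int) (isInv : Bool) : Prop :=
  isInv = true ∧ 0 < nbr ∧ 0 ≤ statePointer ∧ statePointer < state.length ∧
    (state.length : Int) < statePointer + 4 ∧
    (state.drop statePointer.toNat).rotate
        ((state.length - statePointer.toNat) - nbr.toNat % (state.length - statePointer.toNat))
      ≠ state.drop statePointer.toNat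
instance (state : List Int) (statePointer : Int) (nbr : Int) (isInv : Bool) : Decidable (D_shiftRow_py state statePointer nbr isInv) := by unfold D_shiftRow_py; infer_instance

def Spec_shiftRow_py (state : List Int) (statePointer : Int) (nbr : Int) (isInv : Bool) (out : List Int) : Prop := ¬ D_shiftRow_py state statePointer nbr isInv → out = shiftRow_py_alt state statePointer nbr isInv
instance (state : List Int) (statePointer : Int) (nbr : Int) (isInv : Bool) (out : List Int) : Decidable (Spec_shiftRow_py state statePointer nbr isInv out) := by unfold Spec_shiftRow_py; infer_instance

def pvDiffWitness_shiftRow_py : List Int × Int × Int × Bool := ([1, 2], 0, 1, true)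
def pvDiffWitnessOut_shiftRow_py : (List Int) × (List Int) := ([1, 2], [2, 1])

-- ===== CLAIM (what is proved, stated in full; the proofs are below) =====
def Claim_unchanged_shiftRow_py : Prop := ∀ (state : List Int) (statePointer : Int) (nbr : Int) (isInv : Bool), Dom_shiftRow_py state statePointer nbr isInv → Pre_shiftRow_py state statePointer nbr isInv → Spec_shiftRow_py state statePointer nbr isInv (shiftRow_py state statePointer nbr isInv)
def Claim_changed_shiftRow_py : Prop := Dom_shiftRow_py (pvDiffWitness_shiftRow_py.1) (pvDiffWitness_shiftRow_py.2.1) (pvDiffWitness_shiftRow_py.2.2.1) (pvDiffWitness_shiftRow_py.2.2.2) ∧ Pre_shiftRow_py (pvDiffWitness_shiftRow_py.1) (pvDiffWitness_shiftRow_py.2.1) (pvDiffWitness_shiftRow_py.2.2.1) (pvDiffWitness_shiftRow_py.2.2.2) ∧ D_shiftRow_py (pvDiffWitness_shiftRow_py.1) (pvDiffWitness_shiftRow_py.2.1) (pvDiffWitness_shiftRow_py.2.2.1) (pvDiffWitness_shiftRow_py.2.2.2) ∧ shiftRow_py (pvDiffWitness_shiftRow_py.1) (pvDiffWitness_shiftRow_py.2.1)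 (pvDiffWitness_shiftRow_py.2.2.1) (pvDiffWitness_shiftRow_py.2.2.2) = pvDiffWitnessOut_shiftRow_py.1 ∧ shiftRow_py_alt (pvDiffWitness_shiftRow_py.1) (pvDiffWitness_shiftRow_py.2.1) (pvDiffWitness_shiftRow_py.2.2.1) (pvDiffWitness_shiftRow_py.2.2.2) = pvDiffWitnessOut_shiftRow_py.2 ∧ pvDiffWitnessOut_shiftRow_py.1 ≠ pvDiffWitnessOut_shiftRow_py.2
def Claim_exact_shiftRow_py : Prop := ∀ (state : List Int) (statePointer : Int) (nbr : Int) (isInv : Bool), Dom_shiftRow_py state statePointer nbr isInv → Pre_shiftRow_py state statePointer nbr isInv → D_shiftRow_py state statePointer nbr isInv → shiftRow_py state statePointer nbr isInv ≠ shiftRow_py_alt state statePointer nbr isInv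

-- ===== LEMMAS AND PROOFS =====

theorem pvSetSlice_eq (xs : List Int) (p : Nat) (ys : List Int) :
    pvSetSlice xs (p : Int) ((p : Int) + 4) ys = xs.take p ++ ys ++ xs.drop (p + 4) := by
  have h4 : ((p : Int) + 4) = ((p + 4 : Nat) : Int) := by push_cast; ring
  unfold pvSetSlice
  rw [h4, PySem.List.clampIdx_natCast, PySem.List.clampIdx_natCast]
  have hmax : max (min (p + 4) xs.length) (min p xs.length) = min (p + 4) xs.length := by omega
  rw [hmax]
  have htake : xs.take (min p xs.length) = xs.take p := by
    rw [← List.take_take, List.take_length]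
  have hdrop : xs.drop (min (p + 4) xs.length) = xs.drop (p + 4) := by
    rcases Nat.le_total (p + 4) xs.length with h | h
    · rw [min_eq_left h]
    · rw [min_eq_right h, List.drop_length, List.drop_eq_nil_of_le h]
  rw [htake, hdrop]

theorem pv_drop_pre (pre l : List Int) (a : Nat) :
    (pre ++ l).drop (pre.length + a) = l.drop a := by
  simp [List.drop_append]

theorem pv_recomp (state : List Int) (p : Nat) :
    state.take p ++ ((state.drop p).take 4 ++ state.drop (p + 4)) = state := by
  rw [show state.drop (p + 4) = (state.drop p).drop 4 by rw [List.drop_drop],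
      List.take_append_drop, List.take_append_drop]

theorem pv_slice_decomp (pre w suf : List Int) (a b : Nat)
    (h : (a ≤ w.length ∧ b - a ≤ w.length - a) ∨ suf = []) :
    PySem.List.slice (pre ++ w ++ suf) (some ((pre.length : Int) + a)) (some ((pre.length : Int) + b))
      = (w.drop a).take (b - a) := by
  have hca : ((pre.length : Int) + a) = ((pre.length + a : Nat) : Int) := by push_cast; ring
  have hcb : ((pre.length : Int) + b) = ((pre.length + b : Nat) : Int) := by push_cast; ring
  rw [hca, hcb, PySem.List.slice_natCast,
      show pre.length + b - (pre.length + a) = b - a by omega,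
      List.append_assoc, pv_drop_pre]
  rcases h with ⟨ha, hb⟩ | hsuf
  · rw [List.drop_append_of_le_length ha,
        List.take_append_of_le_length (by rw [List.length_drop]; omega)]
  · subst hsuf; rw [List.append_nil]

theorem pv_slice_decomp0 (pre w suf : List Int) (b : Nat)
    (hb : b ≤ w.length ∨ suf = []) :
    PySem.List.slice (pre ++ w ++ suf) (some (pre.length : Int)) (some ((pre.length : Int) + b))
      = w.take b := by
  have hcb : ((pre.length : Int) + b) = ((pre.length + b : Nat) : Int) := by push_cast; ring
  rw [hcb, PySem.List.slice_natCast, List.append_assoc, List.drop_left,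
      show pre.length + b - pre.length = b by omega]
  rcases hb with hb | hb
  · rw [List.take_append_of_le_length hb]
  · subst hb; rw [List.append_nil]

theorem pv_step (pre w suf : List Int) (hL1 : 1 ≤ w.length) (hL4 : w.length ≤ 4)
    (hsuf : w.length = 4 ∨ suf = []) (isInv : Bool) :
    (if isInv then
        pvSetSlice (pre ++ w ++ suf) (pre.length : Int) ((pre.length : Int) + 4)
          (PySem.List.slice (pre ++ w ++ suf) (some ((pre.length : Int) + 3)) (some ((pre.length : Int) + 4)) ++
           PySem.List.slice (pre ++ w ++ suf) (some (pre.length : Int)) (some ((pre.length : Int) + 3)))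
      else
        pvSetSlice (pre ++ w ++ suf) (pre.length : Int) ((pre.length : Int) + 4)
          (PySem.List.slice (pre ++ w ++ suf) (some ((pre.length : Int) + 1)) (some ((pre.length : Int) + 4)) ++
           PySem.List.slice (pre ++ w ++ suf) (some (pre.length : Int)) (some ((pre.length : Int) + 1))))
    = pre ++ w.rotate (if isInv then (if w.length = 4 then 3 else 0) else 1) ++ suf := by
  have htake : (pre ++ w ++ suf).take pre.length = pre := by
    rw [List.append_assoc]; exact List.take_left' rfl
  have hdrop : (pre ++ w ++ suf).drop (pre.length + 4) = suf := by
    rw [List.append_assoc, pv_drop_pre]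
    rcases hsuf with h | h
    · rw [List.drop_append_of_le_length (by omega)]
      simp [h]
    · subst h
      simp [List.drop_eq_nil_of_le, hL4]
  have h1c : ((pre.length : Int) + 1) = ((pre.length : Int) + (1 : Nat)) := by push_cast; ring
  have h3c : ((pre.length : Int) + 3) = ((pre.length : Int) + (3 : Nat)) := by push_cast; ring
  have h4c : ((pre.length : Int) + 4) = ((pre.length : Int) + (4 : Nat)) := by push_cast; ring
  cases isInv with
  | false =>
    simp only [Bool.false_eq_true, if_false]
    have e1 : (w.drop 1).take (4 - 1) = w.drop 1 :=
      List.take_of_length_le (by rw [List.length_drop]; omega)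
    rw [pvSetSlice_eq _ _ , h1c, h4c,
        pv_slice_decomp pre w suf 1 4 (hsuf.imp (fun h => by omega) id),
        pv_slice_decomp0 pre w suf 1 (Or.inl (by omega)),
        e1, htake, hdrop, List.rotate_eq_drop_append_take (by omega)]
  | true =>
    simp only [if_true]
    rw [pvSetSlice_eq _ _ , h3c, h4c,
        pv_slice_decomp pre w suf 3 4 (hsuf.imp (fun h => by omega) id),
        pv_slice_decomp0 pre w suf 3 (hsuf.imp (fun h => by omega) id),
        htake, hdrop]
    by_cases hf : w.length = 4
    · have e1 : (w.drop 3).take (4 - 3) = w.drop 3 :=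
        List.take_of_length_le (by rw [List.length_drop]; omega)
      rw [if_pos hf, e1, List.rotate_eq_drop_append_take (by omega)]
    · have hlt : w.length < 4 := lt_of_le_of_ne hL4 hf
      have e1 : w.drop 3 = [] := List.drop_eq_nil_of_le (by omega)
      have e2 : w.take 3 = w := List.take_of_length_le (by omega)
      rw [if_neg hf, List.rotate_zero, e1, e2]
      simp

theorem pv_foldl_const {α β : Type} (f : α → α) (l : List β) (x : α) :
    l.foldl (fun a _ => f a) x = f^[l.length] x := by
  induction l generalizing x with
  | nil => rfl
  | cons h t ih => simp [List.foldl_cons, Function.iterate_succ_apply, ih]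

theorem pv_iter (isInv : Bool) (k : Nat) (pre w suf : List Int)
    (hL1 : 1 ≤ w.length) (hL4 : w.length ≤ 4) (hsuf : w.length = 4 ∨ suf = []) :
    (fun st => if isInv then
        pvSetSlice st (pre.length : Int) ((pre.length : Int) + 4)
          (PySem.List.slice st (some ((pre.length : Int) + 3)) (some ((pre.length : Int) + 4)) ++
           PySem.List.slice st (some (pre.length : Int)) (some ((pre.length : Int) + 3)))
      else
        pvSetSlice st (pre.length : Int) ((pre.length : Int) + 4)
          (PySem.List.slice st (some ((pre.length : Int) + 1)) (some ((pre.length : Int) + 4)) ++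
           PySem.List.slice st (some (pre.length : Int)) (some ((pre.length : Int) + 1))))^[k]
      (pre ++ w ++ suf)
    = pre ++ w.rotate ((if isInv then (if w.length = 4 then 3 else 0) else 1) * k) ++ suf := by
  induction k generalizing w with
  | zero => simp
  | succ n ih =>
    rw [Function.iterate_succ_apply]
    have hstep := pv_step pre w suf hL1 hL4 hsuf isInv
    simp only at hstep ⊢
    rw [hstep, ih (w.rotate (if isInv then (if w.length = 4 then 3 else 0) else 1))
          (by rw [List.length_rotate]; omega) (by rw [List.length_rotate]; omega)
          (by rw [List.length_rotate]; exact hsuf),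
        List.rotate_rotate, List.length_rotate]
    congr 2
    rw [Nat.mul_succ, Nat.add_comm]

theorem pv_step_id (st : List Int) (p : Nat) (h : st.length ≤ p) (isInv : Bool) :
    (if isInv then
        pvSetSlice st (p : Int) ((p : Int) + 4)
          (PySem.List.slice st (some ((p : Int) + 3)) (some ((p : Int) + 4)) ++
           PySem.List.slice st (some (p : Int)) (some ((p : Int) + 3)))
      else
        pvSetSlice st (p : Int) ((p : Int) + 4)
          (PySem.List.slice st (some ((p : Int) + 1)) (some ((p : Int) + 4)) ++
           PySem.List.slice st (some (p : Int)) (some ((p : Int) + 1))))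
    = st := by
  have hsl : ∀ (a b : Nat), PySem.List.slice st (some ((p : Int) + a)) (some ((p : Int) + b)) = [] := by
    intro a b
    rw [show ((p : Int) + a) = ((p + a : Nat) : Int) by push_cast; ring,
        show ((p : Int) + b) = ((p + b : Nat) : Int) by push_cast; ring,
        PySem.List.slice_natCast, List.drop_eq_nil_of_le (by omega)]
    simp
  have hsl0 : ∀ (b : Nat), PySem.List.slice st (some (p : Int)) (some ((p : Int) + b)) = [] := by
    intro b
    rw [show ((p : Int) + b) = ((p + b : Nat) : Int) by push_cast; ring,
        PySem.List.slice_natCast, List.drop_eq_nil_of_le (by omega)]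
    simp
  have hset : pvSetSlice st (p : Int) ((p : Int) + 4) [] = st := by
    rw [pvSetSlice_eq, List.take_of_length_le h, List.drop_eq_nil_of_le (by omega)]
    simp
  cases isInv with
  | false =>
    simp only [Bool.false_eq_true, if_false]
    rw [show ((p : Int) + 1) = ((p : Int) + (1 : Nat)) by push_cast; ring,
        show ((p : Int) + 4) = ((p : Int) + (4 : Nat)) by push_cast; ring,
        hsl 1 4, hsl0 1]
    exact hset
  | true =>
    simp only [if_true]
    rw [show ((p : Int) + 3) = ((p : Int) + (3 : Nat)) by push_cast; ring,
        show ((p : Int) + 4) = ((p : Int) + (4 : Nat)) by push_cast; ring,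
        hsl 3 4, hsl0 3]
    exact hset

theorem pv_A_id (state : List Int) (p : Nat) (nbr : Int) (isInv : Bool)
    (h : state.length ≤ p) :
    shiftRow_py state (p : Int) nbr isInv = state := by
  unfold shiftRow_py
  rw [pv_foldl_const]
  exact Function.iterate_fixed (pv_step_id state p h isInv) _

theorem shiftRow_py_decomp (state : List Int) (p : Nat) (nbr : Int) (isInv : Bool)
    (hpn : p < state.length) :
    shiftRow_py state (p : Int) nbr isInv
      = state.take p ++
        ((state.drop p).take 4).rotate
          ((if isInv then (if ((state.drop p).take 4).length = 4 then 3 else 0) else 1) * nbr.toNat) ++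
        state.drop (p + 4) := by
  set pre := state.take p with hpre
  set w := (state.drop p).take 4 with hww
  set suf := state.drop (p + 4) with hsuf
  have hprelen : pre.length = p := by simp [hpre]; omega
  have hwlen : w.length = min 4 (state.length - p) := by simp [hww]
  have hL1 : 1 ≤ w.length := by omega
  have hL4 : w.length ≤ 4 := by omega
  have hs : w.length = 4 ∨ suf = [] := by
    rcases Nat.le_total (p + 4) state.length with h | h
    · left; omega
    · right; rw [hsuf]; exact List.drop_eq_nil_of_le h
  have hdecomp : state = pre ++ w ++ suf := by
    rw [hpre, hww, hsuf, List.append_assoc, pv_recomp]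
  unfold shiftRow_py
  rw [pv_foldl_const, PySem.List.length_pyRange_one, ← hprelen]
  conv_lhs => rw [hdecomp]
  rw [pv_iter isInv (nbr - 0).toNat pre w suf hL1 hL4 hs,
      show (nbr - 0).toNat = nbr.toNat by omega]

theorem pv_slice_rot (w : List Int) (off : Nat) (h : off ≤ w.length) :
    PySem.List.slice w (some ((off : Nat) : Int)) none ++
      PySem.List.slice w none (some ((off : Nat) : Int)) = w.rotate off := by
  rw [PySem.List.slice_from_natCast, PySem.List.slice_to_natCast,
      List.rotate_eq_drop_append_take h]

theorem pv_row_eq (state : List Int) (p : Nat) :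
    PySem.List.slice state (some ((p : Int))) (some ((p : Int) + 4)) = (state.drop p).take 4 := by
  rw [show ((p : Int) + 4) = ((p + 4 : Nat) : Int) by push_cast; ring, PySem.List.slice_natCast]
  congr 1
  omega

-- closed form of B on a truncated inverse row (used by both the agreement and the tightness proof)
theorem pv_B_short_inv (state : List Int) (p : Nat) (nbr : Int)
    (hpn : p < state.length) (hshort : state.length < p + 4) (hn : 0 < nbr) :
    shiftRow_py_alt state (p : Int) nbr true
      = state.take p ++
        (state.drop p).rotate ((state.length - p) - nbr.toNat % (state.length - p)) ++
        state.drop (p + 4) := by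
  have hweq : (state.drop p).take 4 = state.drop p :=
    List.take_of_length_le (by rw [List.length_drop]; omega)
  have hdlen : (state.drop p).length = state.length - p := by rw [List.length_drop]
  have hL1 : 1 ≤ state.length - p := by omega
  simp only [shiftRow_py_alt]
  rw [pv_row_eq, hweq, hdlen]
  have hcond : nbr > 0 ∧ 0 < (((state.length - p : Nat) : Nat) : Int) :=
    ⟨hn, by exact_mod_cast hL1⟩
  rw [if_pos hcond]
  have hnbr : nbr = ((nbr.toNat : Nat) : Int) := by omega
  have hmod : PySem.Int.mod nbr (((state.length - p : Nat) : Nat) : Int)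
      = ((nbr.toNat % (state.length - p) : Nat) : Int) := by
    rw [hnbr]; exact PySem.Int.mod_natCast _ _
  simp only [if_true]
  rw [hmod,
      show (((state.length - p : Nat) : Nat) : Int) - ((nbr.toNat % (state.length - p) : Nat) : Int)
        = (((state.length - p) - nbr.toNat % (state.length - p) : Nat) : Int) by
        rw [Nat.cast_sub (Nat.le_of_lt (Nat.mod_lt _ (by omega)))],
      PySem.Int.mod_natCast,
      pv_slice_rot _ _ (by rw [hdlen]; exact Nat.le_of_lt (Nat.mod_lt _ (by omega))),
      pvSetSlice_eq state p,
      show ((state.length - p) - nbr.toNat % (state.length - p)) % (state.length - p)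
        = ((state.length - p) - nbr.toNat % (state.length - p)) % (state.drop p).length by
        rw [hdlen],
      List.rotate_mod]

-- ===== VERDICT (by name: the statement is the Claim_ definition above) =====
theorem shiftRow_py_spec : Claim_unchanged_shiftRow_py := by
  intro state statePointer nbr isInv _ hpre hnd
  unfold Pre_shiftRow_py at hpre
  obtain ⟨p, hp⟩ : ∃ p : Nat, statePointer = (p : Int) := ⟨statePointer.toNat, by omega⟩
  subst hp
  by_cases hpn : p < state.length
  case neg =>
    -- empty row: A's loop body is the identity and B takes its else-branch
    rw [pv_A_id state p nbr isInv (by omega)]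
    simp only [shiftRow_py_alt]
    rw [pv_row_eq, List.drop_eq_nil_of_le (by omega)]
    simp
  case pos =>
    have hwlen : ((state.drop p).take 4).length = min 4 (state.length - p) := by simp
    have hL1 : 1 ≤ ((state.drop p).take 4).length := by omega
    rw [shiftRow_py_decomp state p nbr isInv hpn]
    by_cases hn : nbr > 0
    case neg =>
      simp only [shiftRow_py_alt]
      rw [pv_row_eq]
      have hc : ¬(nbr > 0 ∧ 0 < ((((state.drop p).take 4).length : Nat) : Int)) := fun h => hn h.1
      rw [if_neg hc, show nbr.toNat = 0 by omega]
      simp only [Nat.mul_zero, List.rotate_zero]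
      rw [List.append_assoc, pv_recomp]
    case pos =>
      cases isInv with
      | false =>
        simp only [shiftRow_py_alt]
        rw [pv_row_eq]
        have hcond : nbr > 0 ∧ 0 < ((((state.drop p).take 4).length : Nat) : Int) :=
          ⟨hn, by exact_mod_cast hL1⟩
        rw [if_pos hcond]
        have hnbr : nbr = ((nbr.toNat : Nat) : Int) := by omega
        have hmod : PySem.Int.mod nbr ((((state.drop p).take 4).length : Nat) : Int)
            = ((nbr.toNat % ((state.drop p).take 4).length : Nat) : Int) := by
          rw [hnbr]; exact PySem.Int.mod_natCast _ _
        simp only [Bool.false_eq_true, if_false]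
        rw [hmod, pv_slice_rot _ _ (Nat.le_of_lt (Nat.mod_lt _ (by omega))),
            pvSetSlice_eq state p, one_mul, ← List.rotate_mod]
      | true =>
        by_cases hf : ((state.drop p).take 4).length = 4
        · simp only [shiftRow_py_alt]
          rw [pv_row_eq]
          have hcond : nbr > 0 ∧ 0 < ((((state.drop p).take 4).length : Nat) : Int) :=
            ⟨hn, by exact_mod_cast hL1⟩
          rw [if_pos hcond]
          have hnbr : nbr = ((nbr.toNat : Nat) : Int) := by omega
          have hmod : PySem.Int.mod nbr ((((state.drop p).take 4).length : Nat) : Int)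
              = ((nbr.toNat % ((state.drop p).take 4).length : Nat) : Int) := by
            rw [hnbr]; exact PySem.Int.mod_natCast _ _
          simp only [if_true]
          rw [if_pos hf, hmod, hf,
              show ((4 : Nat) : Int) - ((nbr.toNat % 4 : Nat) : Int)
                = ((4 - nbr.toNat % 4 : Nat) : Int) by
                rw [Nat.cast_sub (by omega : nbr.toNat % 4 ≤ 4)],
              PySem.Int.mod_natCast,
              pv_slice_rot _ _ (by rw [hf]; omega),
              pvSetSlice_eq state p]
          have hrot : ((state.drop p).take 4).rotate (3 * nbr.toNat)
              = ((state.drop p).take 4).rotate ((4 - nbr.toNat % 4) % 4) := by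
            rw [← List.rotate_mod ((state.drop p).take 4) (3 * nbr.toNat), hf]
            congr 1
            omega
          rw [hrot, ← List.rotate_mod, hf]
        · -- truncated inverse row: outside D_ the right-rotation fixes the row
          have hshort : state.length < p + 4 := by omega
          have hweq : (state.drop p).take 4 = state.drop p :=
            List.take_of_length_le (by rw [List.length_drop]; omega)
          have hfix : (state.drop p).rotate
                ((state.length - p) - nbr.toNat % (state.length - p)) = state.drop p := by
            by_contra hc
            exact hnd ⟨rfl, hn, by omega, by exact_mod_cast hpn, by push_cast; omega,
              by rw [show ((p : Int)).toNat = p by omega]; exact hc⟩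
          rw [pv_B_short_inv state p nbr hpn hshort hn, if_neg hf]
          simp only [if_true]
          rw [Nat.zero_mul, List.rotate_zero, hweq, hfix]

theorem shiftRow_py_changed : Claim_changed_shiftRow_py := by
  unfold Claim_changed_shiftRow_py; decide

theorem shiftRow_py_tight : Claim_exact_shiftRow_py := by
  intro state statePointer nbr isInv _ hpre hd hab
  obtain ⟨hi, hn, hs, hlt, hshort, hne⟩ := hd
  subst hi
  obtain ⟨p, hp⟩ : ∃ p : Nat, statePointer = (p : Int) := ⟨statePointer.toNat, by omega⟩
  subst hp
  have hpn : p < state.length := by exact_mod_cast hlt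
  have hshort' : state.length < p + 4 := by omega
  have hweq : (state.drop p).take 4 = state.drop p :=
    List.take_of_length_le (by rw [List.length_drop]; omega)
  have hf : ¬((state.drop p).take 4).length = 4 := by
    rw [hweq, List.length_drop]; omega
  rw [shiftRow_py_decomp state p nbr true hpn, if_neg hf] at hab
  simp only [if_true] at hab
  rw [Nat.zero_mul, List.rotate_zero,
      pv_B_short_inv state p nbr hpn hshort' hn, hweq] at hab
  rw [List.append_assoc, List.append_assoc] at hab
  have hcanc := List.append_cancel_left hab
  have hcanc2 := List.append_cancel_right hcanc
  rw [show ((p : Int)).toNat = p by omega] at hne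
  exact hne hcanc2.symm
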